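-- pv_equiv track=rewrite | github.com/NRG367GSI/introduction-to-Python | Homework_3/Homework_3.py | difference_max_min
-- ===== SOURCE A (Python) =====
-- def difference_max_min(seq): # находит разность максимального и минемального элемента массива
--     min = seq[0]
--     max = seq[0]
--     for i in seq:
--         if i < min:
--             min = i
--         elif i > max:
--             max = i
--     return max, min, max - min
-- ===== SOURCE B (Python) =====
-- def difference_max_min(seq):
--     s = sorted(seq)
--     return s[-1], s[0], s[-1] - s[0]
-- ===== Notes on version B (the rewrite author's own statement) =====
-- stated objective: simpler
-- what changed: Replaces A's comparison-scan that maintains running min/max with a sort-then-index strategy: sort once and read the extremes off the ends of the sorted list.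
import Mathlib
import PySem

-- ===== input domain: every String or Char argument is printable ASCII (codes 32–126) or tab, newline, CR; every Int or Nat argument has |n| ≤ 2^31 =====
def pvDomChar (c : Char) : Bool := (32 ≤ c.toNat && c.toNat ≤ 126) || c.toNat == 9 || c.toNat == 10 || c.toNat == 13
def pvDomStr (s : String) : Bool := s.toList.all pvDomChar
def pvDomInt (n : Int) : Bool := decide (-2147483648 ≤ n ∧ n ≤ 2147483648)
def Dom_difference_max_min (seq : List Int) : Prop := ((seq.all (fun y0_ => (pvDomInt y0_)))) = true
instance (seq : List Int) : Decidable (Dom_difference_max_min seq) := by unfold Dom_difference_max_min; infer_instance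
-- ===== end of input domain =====

-- B replaces A's one-pass running-min/max scan with sort-then-index (simpler); both raise IndexError on [], excluded by Pre_.

-- ===== PORT A =====
-- A: min = max = seq[0]; one pass over seq updating min/max; return max, min, max - min.
def difference_max_min (seq : List Int) : Int × Int × Int :=
  match seq with
  | [] => (0, 0, 0)  -- unreachable: seq[0] raises IndexError; excluded by Pre_
  | x :: _ =>
    let p := seq.foldl
      (fun (s : Int × Int) i =>
        if i < s.1 then (i, s.2) else if i > s.2 then (s.1, i) else s)
      (x, x)
    (p.2, p.1, p.2 - p.1)

-- ===== PORT B =====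
-- B: s = sorted(seq); return s[-1], s[0], s[-1] - s[0].
def difference_max_min_alt (seq : List Int) : Int × Int × Int :=
  let s := PySem.List.sorted seq (fun x => x) false
  match PySem.List.pyGet? s (-1), PySem.List.pyGet? s 0 with
  | some mx, some mn => (mx, mn, mx - mn)
  | _, _ => (0, 0, 0)  -- unreachable: s[-1] raises IndexError on []; excluded by Pre_

-- ===== PRECONDITION & SPEC =====
-- Pre_ excludes only the empty list, on which both A (seq[0]) and B (s[-1]) raise IndexError.
def Pre_difference_max_min (seq : List Int) : Prop := seq ≠ []
instance (seq : List Int) : Decidable (Pre_difference_max_min seq) := by unfold Pre_difference_max_min; infer_instance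
def pvWitness_difference_max_min : List Int := ([3, -1, 4])

def Spec_difference_max_min (seq : List Int) (out : Int × Int × Int) : Prop := out = difference_max_min_alt seq
instance (seq : List Int) (out : Int × Int × Int) : Decidable (Spec_difference_max_min seq out) := by unfold Spec_difference_max_min; infer_instance

-- ===== CLAIM (what is proved, stated in full; the proofs are below) =====
def Claim_equal_difference_max_min : Prop := ∀ (seq : List Int), Dom_difference_max_min seq → Pre_difference_max_min seq → Spec_difference_max_min seq (difference_max_min seq)

-- ===== LEMMAS AND PROOFS =====

-- A's loop body performs the componentwise (min, max) step whenever the state is ordered.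
theorem pvFoldA_eq_min_max (l : List Int) :
    ∀ mn mx : Int, mn ≤ mx →
      l.foldl (fun (s : Int × Int) i =>
          if i < s.1 then (i, s.2) else if i > s.2 then (s.1, i) else s) (mn, mx)
        = (l.foldl min mn, l.foldl max mx) := by
  induction l with
  | nil => intro mn mx _; rfl
  | cons a t ih =>
    intro mn mx h
    simp only [List.foldl_cons]
    have hstep : (if a < mn then (a, mx) else if a > mx then (mn, a) else (mn, mx))
        = (min mn a, max mx a) := by
      split_ifs with h1 h2 <;> simp_all <;> omega
    rw [hstep]
    exact ih _ _ (le_trans (min_le_left mn a) (le_trans h (le_max_left mx a)))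

-- B's s[-1]: the last element of the sorted list is the running maximum A's loop computes.
theorem pvSorted_neg_one (x : Int) (xs : List Int) :
    PySem.List.pyGet? (PySem.List.sorted (x :: xs) (fun y => y) false) (-1)
        = some (xs.foldl max x) := by
  set s := PySem.List.sorted (x :: xs) (fun y => y) false with hs
  have hperm : s.Perm (x :: xs) := PySem.List.sorted_perm _ _ _
  have hne : s ≠ [] := by
    intro h0; exact (List.cons_ne_nil x xs) (List.Perm.nil_eq (h0 ▸ hperm)).symm
  have hpw : s.Pairwise (fun a b => a ≤ b) := PySem.List.sorted_pairwise _ _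
  have hge : ∀ y ∈ s, y ≤ s.getLast hne := by
    have hrev : s.reverse.Pairwise (fun a b => b ≤ a) := List.pairwise_reverse.mpr hpw
    intro y hy
    rw [← List.mem_reverse] at hy
    rcases List.exists_cons_of_ne_nil (l := s.reverse) (by simpa using hne) with ⟨m', t', hr⟩
    have hm' : m' = s.getLast hne := by
      have h1 : s.reverse.head? = some m' := by rw [hr]; rfl
      have h2 : s.reverse.head? = s.getLast? := by simp
      have h3 : s.getLast? = some (s.getLast hne) := List.getLast?_eq_some_getLast hne
      rw [h2, h3] at h1; exact (Option.some.injEq _ _ ▸ h1).symm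
    rw [hr] at hrev hy
    rcases List.mem_cons.mp hy with hy | hy
    · exact le_of_eq (hy.trans hm')
    · have := (List.pairwise_cons.mp hrev).1 y hy
      exact hm' ▸ this
  have hmaxs : PySem.List.max? (x :: xs) (fun y => y) = some (xs.foldl max x) :=
    PySem.List.max?_id_cons x xs
  have hmem : xs.foldl max x ∈ s := hperm.mem_iff.mpr (PySem.List.max?_mem hmaxs)
  have hle : ∀ y ∈ (x :: xs), y ≤ xs.foldl max x := PySem.List.max?_isMax hmaxs
  have heq : s.getLast hne = xs.foldl max x :=
    le_antisymm (hle _ (hperm.mem_iff.mp (s.getLast_mem hne))) (hge _ hmem)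
  rw [PySem.List.pyGet?_neg_one, List.getLast?_eq_some_getLast hne, heq]

-- B's s[0]: the head of the sorted list is the running minimum A's loop computes.
theorem pvSorted_zero (x : Int) (xs : List Int) :
    PySem.List.pyGet? (PySem.List.sorted (x :: xs) (fun y => y) false) 0
        = some (xs.foldl min x) := by
  set s := PySem.List.sorted (x :: xs) (fun y => y) false with hs
  have hperm : s.Perm (x :: xs) := PySem.List.sorted_perm _ _ _
  have hne : s ≠ [] := by
    intro h0; exact (List.cons_ne_nil x xs) (List.Perm.nil_eq (h0 ▸ hperm)).symm
  rcases List.exists_cons_of_ne_nil hne with ⟨m, t, hcons⟩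
  have hsc : PySem.List.sorted (x :: xs) (fun y => y) = m :: t := by rw [← hs]; exact hcons
  have hle : ∀ y ∈ (x :: xs), m ≤ y := PySem.List.key_head_sorted_le _ _ hsc
  have hmins : PySem.List.min? (x :: xs) (fun y => y) = some (xs.foldl min x) :=
    PySem.List.min?_id_cons x xs
  have hmem : m ∈ (x :: xs) := by
    refine hperm.mem_iff.mp ?_
    rw [hcons]; exact List.mem_cons_self
  have hge : ∀ y ∈ (x :: xs), xs.foldl min x ≤ y := PySem.List.min?_isMin hmins
  have hmemMin : xs.foldl min x ∈ s := hperm.mem_iff.mpr (PySem.List.min?_mem hmins)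
  have heq : m = xs.foldl min x :=
    le_antisymm (by
      rcases List.mem_cons.mp (hcons ▸ hmemMin) with h | h
      · exact le_of_eq h.symm
      · exact hle _ (hperm.mem_iff.mp (hcons ▸ (List.mem_cons_of_mem m h))))
      (hge _ hmem)
  rw [hcons]
  simp [PySem.List.pyGet?, PySem.List.pyIdx?, heq]

-- ===== VERDICT (by name: the statement is the Claim_ definition above) =====
theorem difference_max_min_spec : Claim_equal_difference_max_min := by
  intro seq _ hpre
  unfold Spec_difference_max_min
  cases seq with
  | nil => exact absurd rfl hpre
  | cons x xs =>
    show difference_max_min (x :: xs) = difference_max_min_alt (x :: xs)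
    have hA : difference_max_min (x :: xs)
        = (xs.foldl max x, xs.foldl min x, xs.foldl max x - xs.foldl min x) := by
      simp only [difference_max_min]
      rw [pvFoldA_eq_min_max (x :: xs) x x (le_refl x)]
      simp [List.foldl_cons]
    have hB : difference_max_min_alt (x :: xs)
        = (xs.foldl max x, xs.foldl min x, xs.foldl max x - xs.foldl min x) := by
      simp only [difference_max_min_alt]
      rw [pvSorted_neg_one, pvSorted_zero]
    rw [hA, hB]
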